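-- pv_equiv track=rewrite | github.com/ksy2575/clone_algorithm | PROGRAMMERS/PROGRAMMERS test-무지의 먹방 라이브.py | solution
-- ===== SOURCE A (Python) =====
-- def solution(food_times, k):
--     ans = 0
--     left = 0
--     right = 2000000
--     length = len(food_times)
--
--     while left <= right:
--       mid = (left+right)//2
--       time = mid*length
--       for food in food_times:
--         temp = food-mid
--         if temp < 0:
--           time += temp
--       if time <= k:
--         left = mid + 1
--         aroundTime = mid
--       else:
--         right = mid - 1
--     for i in range(length):
--       food_times[i] -= aroundTime
--     ans = k-(aroundTime * length)
--     for i in range(length):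
--       if ans == 0:
--         return i
--       if food_times[i] < 0:
--         ans += food_times[i]
--     return -1
-- ===== SOURCE B (Python) =====
-- def solution(food_times, k):
--     # Return-value equivalent to A; does NOT mutate food_times in place (A does).
--     CAP = 2000000  # same upper bound on complete rounds as the original's search range
--     n = len(food_times)
--     # a = largest m in [0, CAP] with sum(min(f, m) for f in food_times) <= k,
--     # found by one walk over the sorted amounts instead of a binary search.
--     a = CAP
--     eaten = 0   # total of the amounts already fully cleared
--     r = n       # amounts not yet fully cleared
--     for v in sorted(food_times):
--         if v > CAP or eaten + v * r > k:
--             m = (k - eaten) // r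
--             a = m if m < CAP else CAP
--             break
--         eaten += v
--         r -= 1
--     # leftover seconds after a complete rounds; find the next food to eat
--     target = a * n - k
--     d = 0
--     for i, f in enumerate(food_times):
--         if d == target:
--             return i
--         if f < a:
--             d += f - a
--     return -1
-- ===== Notes on version B (the rewrite author's own statement) =====
-- stated objective: faster
-- what changed: Replaces A's binary search over the number of complete rounds (~21 full passes over the list) with a single walk over the sorted food amounts that finds the same largest affordable round count directly, then one enumerate pass for the partial round; B does not mutate food_times in place (return value is identical).
import Mathlib
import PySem

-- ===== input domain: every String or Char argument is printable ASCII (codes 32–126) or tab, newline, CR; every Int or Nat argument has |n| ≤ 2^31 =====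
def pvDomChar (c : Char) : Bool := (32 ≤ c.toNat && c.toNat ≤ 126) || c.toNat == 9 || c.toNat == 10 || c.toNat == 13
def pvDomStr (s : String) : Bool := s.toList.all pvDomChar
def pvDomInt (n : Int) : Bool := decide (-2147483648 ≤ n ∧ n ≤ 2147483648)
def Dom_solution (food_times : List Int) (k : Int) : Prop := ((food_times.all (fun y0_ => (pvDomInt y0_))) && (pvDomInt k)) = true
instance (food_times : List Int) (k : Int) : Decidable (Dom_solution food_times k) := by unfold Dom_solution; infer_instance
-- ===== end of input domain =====

-- B replaces A's binary search (≈21 full passes over the list) by one walk over the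
-- sorted amounts; return-value equivalence only: A mutates food_times in place, B does not.

-- ===== PORT A =====
-- the 'while left <= right' binary search; aroundTime : Option Int is the
-- possibly-unassigned Python variable (none = never assigned = UnboundLocalError later)
-- fuel is only a totality device: it starts at the interval length (right+1-left = 2000001)
-- and each iteration shrinks the interval, so the 'else acc' at fuel 0 is never reached
def solutionSearch (food_times : List Int) (k : Int) : Nat → Int → Int → Option Int → Option Int
  | 0, _, _, acc => acc
  | fuel + 1, left, right, acc =>
    if left ≤ right then
      let mid := PySem.Int.floordiv (left + right) 2
      let time := food_times.foldl
        (fun t food => if food - mid < 0 then t + (food - mid) else t)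
        (mid * (food_times.length : Int))
      if time ≤ k then solutionSearch food_times k fuel (mid + 1) right (some mid)
      else solutionSearch food_times k fuel left (mid - 1) acc
    else acc

-- the final 'for i in range(length)' loop (over the already-decremented list)
def solutionFinal : List Int → Int → Int → Int
  | [], _, _ => -1
  | f :: rest, i, ans =>
    if ans = 0 then i
    else solutionFinal rest (i + 1) (if f < 0 then ans + f else ans)

def solution (food_times : List Int) (k : Int) : Int :=
  let length : Int := food_times.length
  -- Python raises UnboundLocalError when aroundTime was never assigned; Pre_ excludes that
  let aroundTime := (solutionSearch food_times k 2000001 0 2000000 none).getD 0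
  -- the in-place loop 'food_times[i] -= aroundTime'
  let food2 := food_times.map (fun f => f - aroundTime)
  solutionFinal food2 0 (k - aroundTime * length)

-- ===== PORT B =====
-- walk over the sorted amounts: v current amount, eaten = total fully cleared, r = still alive
def altWalk (k CAP : Int) : List Int → Int → Int → Int
  | [], _, _ => CAP
  | v :: rest, eaten, r =>
    if v > CAP ∨ eaten + v * r > k then
      let m := PySem.Int.floordiv (k - eaten) r
      if m < CAP then m else CAP
    else altWalk k CAP rest (eaten + v) (r - 1)

-- the 'for i, f in enumerate(food_times)' loop of Source B
def altFinal (a target : Int) : List Int → Int → Int → Int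
  | [], _, _ => -1
  | f :: rest, i, d =>
    if d = target then i
    else altFinal a target rest (i + 1) (if f < a then d + (f - a) else d)

def solution_alt (food_times : List Int) (k : Int) : Int :=
  let CAP : Int := 2000000
  let n : Int := food_times.length
  let a := altWalk k CAP (PySem.List.sorted food_times (fun x => x) false) 0 n
  altFinal a (a * n - k) food_times 0 0

-- ===== PRECONDITION & SPEC =====
-- Pre_ excludes exactly the inputs where A raises UnboundLocalError: when even 0 complete
-- rounds cost more than k seconds (sum of the negative amounts exceeds k), the binary
-- search never assigns aroundTime.
def Pre_solution (food_times : List Int) (k : Int) : Prop :=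
  (food_times.map (fun f => min f 0)).sum ≤ k
instance (food_times : List Int) (k : Int) : Decidable (Pre_solution food_times k) := by
  unfold Pre_solution; infer_instance

def pvWitness_solution : List Int × Int := ([3, 1, 2], 5)

def Spec_solution (food_times : List Int) (k : Int) (out : Int) : Prop := out = solution_alt food_times k
instance (food_times : List Int) (k : Int) (out : Int) : Decidable (Spec_solution food_times k out) := by unfold Spec_solution; infer_instance

-- ===== CLAIM (what is proved, stated in full; the proofs are below) =====
def Claim_equal_solution : Prop := ∀ (food_times : List Int) (k : Int), Dom_solution food_times k → Pre_solution food_times k → Spec_solution food_times k (solution food_times k)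

-- ===== LEMMAS AND PROOFS =====

-- G ft m = total seconds consumed if every food is eaten down by m levels = Σ min(f, m)
def G (ft : List Int) (m : Int) : Int := (ft.map (fun f => min f m)).sum

lemma G_mono (ft : List Int) {m m' : Int} (h : m ≤ m') : G ft m ≤ G ft m' := by
  induction ft with
  | nil => simp [G]
  | cons f rest ih => simp only [G, List.map, List.sum_cons] at *; omega

lemma G_perm {xs ys : List Int} (h : xs.Perm ys) (m : Int) : G xs m = G ys m :=
  (h.map _).sum_eq

-- when m is below every element, all foods are still alive: G xs m = m * |xs|
lemma G_const (xs : List Int) (m : Int) (h : ∀ f ∈ xs, m ≤ f) : G xs m = m * xs.length := by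
  induction xs with
  | nil => simp [G]
  | cons f rest ih =>
    have h1 : m ≤ f := h f (by simp)
    have h2 := ih (fun g hg => h g (by simp [hg]))
    simp only [G, List.map, List.sum_cons, List.length_cons] at h2 ⊢
    rw [min_eq_right h1, h2]
    push_cast
    ring

-- A's inner for-loop computes G ft mid
lemma timeA (ft : List Int) (mid : Int) : ∀ t : Int,
    ft.foldl (fun tt food => if food - mid < 0 then tt + (food - mid) else tt) t
      = t - mid * ft.length + G ft mid := by
  induction ft with
  | nil => intro t; simp [G]
  | cons f rest ih =>
    intro t
    simp only [List.foldl_cons, G, List.map, List.sum_cons, List.length_cons]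
    rw [ih]
    simp only [G]
    push_cast
    have hmul : mid * ((rest.length : Int) + 1) = mid * (rest.length : Int) + mid := by ring
    rcases le_or_gt f mid with hfm | hfm
    · rw [min_eq_left hfm]; split_ifs <;> omega
    · rw [min_eq_right (by omega : mid ≤ f)]; split_ifs <;> omega

-- one unfolding of the while-loop, with the inner fold rewritten through timeA
lemma solutionSearch_step (ft : List Int) (k : Int) (fuel : Nat) (l r : Int) (acc : Option Int)
    (h : l ≤ r) :
    solutionSearch ft k (fuel + 1) l r acc =
      if G ft (PySem.Int.floordiv (l + r) 2) ≤ k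
      then solutionSearch ft k fuel (PySem.Int.floordiv (l + r) 2 + 1) r
        (some (PySem.Int.floordiv (l + r) 2))
      else solutionSearch ft k fuel l (PySem.Int.floordiv (l + r) 2 - 1) acc := by
  rw [solutionSearch, if_pos h]
  show (if ft.foldl
      (fun t food => if food - PySem.Int.floordiv (l + r) 2 < 0
        then t + (food - PySem.Int.floordiv (l + r) 2) else t)
      (PySem.Int.floordiv (l + r) 2 * (ft.length : Int)) ≤ k
    then solutionSearch ft k fuel (PySem.Int.floordiv (l + r) 2 + 1) r
      (some (PySem.Int.floordiv (l + r) 2))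
    else solutionSearch ft k fuel l (PySem.Int.floordiv (l + r) 2 - 1) acc) = _
  rw [timeA]
  have he : PySem.Int.floordiv (l + r) 2 * (ft.length : Int)
      - PySem.Int.floordiv (l + r) 2 * (ft.length : Int)
      + G ft (PySem.Int.floordiv (l + r) 2) = G ft (PySem.Int.floordiv (l + r) 2) := by ring
  rw [he]

lemma solutionSearch_exit (ft : List Int) (k : Int) (fuel : Nat) (l r : Int) (acc : Option Int)
    (h : ¬ l ≤ r) :
    solutionSearch ft k fuel l r acc = acc := by
  cases fuel with
  | zero => rw [solutionSearch]
  | succ fuel => rw [solutionSearch, if_neg h]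

-- the value both programs compute: the largest m in [0, 2000000] with G ft m ≤ k
def MSpec (ft : List Int) (k a : Int) : Prop :=
  0 ≤ a ∧ a ≤ 2000000 ∧ G ft a ≤ k ∧ ∀ m, a < m → m ≤ 2000000 → ¬ (G ft m ≤ k)

lemma MSpec_unique {ft : List Int} {k a b : Int} (h1 : MSpec ft k a) (h2 : MSpec ft k b) :
    a = b := by
  by_contra hne
  rcases lt_or_gt_of_ne hne with h | h
  · exact h1.2.2.2 b h h2.2.1 h2.2.2.1
  · exact h2.2.2.2 a h h1.2.1 h1.2.2.1

lemma search_spec (ft : List Int) (k : Int) (hP0 : G ft 0 ≤ k) :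
    ∀ (fuel : Nat) (l r : Int) (acc : Option Int), (r + 1 - l).toNat ≤ fuel →
    0 ≤ l → l ≤ r + 1 → r ≤ 2000000 →
    (∀ m, r < m → m ≤ 2000000 → ¬ (G ft m ≤ k)) →
    ((l = 0 ∧ acc = none) ∨ (0 < l ∧ acc = some (l - 1) ∧ G ft (l - 1) ≤ k)) →
    ∃ a, solutionSearch ft k fuel l r acc = some a ∧ MSpec ft k a := by
  intro fuel
  induction fuel with
  | zero =>
    intro l r acc hfuel hl0 hlr hrC hmax hacc
    -- fuel 0 means l > r: the loop is over
    have hgt : r < l := by omega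
    rw [solutionSearch_exit ft k 0 l r acc (by omega)]
    rcases hacc with ⟨hl, hnone⟩ | ⟨hlpos, hsome, hP⟩
    · exfalso; exact hmax 0 (by omega) (by omega) hP0
    · exact ⟨l - 1, hsome, by omega, by omega, hP, fun m hm => hmax m (by omega)⟩
  | succ fuel ih =>
    intro l r acc hfuel hl0 hlr hrC hmax hacc
    by_cases hle : l ≤ r
    · rw [solutionSearch_step ft k fuel l r acc hle]
      have hmid := PySem.Int.floordiv_two_mid_bounds hle
      set mid := PySem.Int.floordiv (l + r) 2 with hmiddef
      by_cases hk : G ft mid ≤ k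
      · rw [if_pos hk]
        exact ih (mid + 1) r (some mid) (by omega) (by omega) (by omega) hrC hmax
          (Or.inr ⟨by omega, by ring_nf, by simpa using hk⟩)
      · rw [if_neg hk]
        refine ih l (mid - 1) acc (by omega) hl0 (by omega) (by omega) ?_ hacc
        intro m hm _ hGm
        exact hk (le_trans (G_mono ft (by omega)) hGm)
    · rw [solutionSearch_exit ft k (fuel + 1) l r acc hle]
      rcases hacc with ⟨hl, hnone⟩ | ⟨hlpos, hsome, hP⟩
      · exfalso; exact hmax 0 (by omega) (by omega) hP0
      · exact ⟨l - 1, hsome, by omega, by omega, hP, fun m hm => hmax m (by omega)⟩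

lemma walk_spec (ft : List Int) (k : Int) :
    ∀ (suf : List Int) (eaten lo : Int),
    suf.Pairwise (· ≤ ·) →
    (∀ f ∈ suf, lo ≤ f) →
    lo ≤ 2000000 →
    (∀ m, lo ≤ m → G ft m = eaten + G suf m) →
    G ft (max lo 0) ≤ k →
    MSpec ft k (altWalk k 2000000 suf eaten (suf.length : Int)) := by
  intro suf
  induction suf with
  | nil =>
    intro eaten lo _ _ hloC hdec hlo
    have h1 : G ft 2000000 = eaten := by simpa [G] using hdec 2000000 (by omega)
    have h2 : G ft (max lo 0) = eaten := by simpa [G] using hdec (max lo 0) (le_max_left _ _)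
    rw [altWalk]
    exact ⟨by omega, le_refl _, by omega, fun m hm hmC => by omega⟩
  | cons v rest ih =>
    intro eaten lo hpw hlof hloC hdec hlo
    have hvrest : ∀ f ∈ rest, v ≤ f := (List.pairwise_cons.mp hpw).1
    have hlov : lo ≤ v := hlof v (by simp)
    have hr : ((v :: rest).length : Int) = (rest.length : Int) + 1 := by simp
    set r : Int := ((v :: rest).length : Int) with hrdef
    have hrpos : 0 < r := by rw [hr]; omega
    -- on the segment lo ≤ m ≤ v every food in the suffix is still alive
    have hreg : ∀ m, lo ≤ m → m ≤ v → G ft m = eaten + m * r := by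
      intro m hm1 hm2
      have hall : ∀ f ∈ v :: rest, m ≤ f := by
        intro f hf
        rcases List.mem_cons.mp hf with h | h
        · omega
        · exact le_trans hm2 (hvrest f h)
      rw [hdec m hm1, G_const (v :: rest) m hall]
    by_cases hstop : v > 2000000 ∨ eaten + v * r > k
    · -- stopping segment
      rw [altWalk, if_pos hstop]
      set m0 := PySem.Int.floordiv (k - eaten) r with hm0def
      have hbr1 : ∀ q : Int, q ≤ m0 ↔ q * r ≤ k - eaten := by
        intro q; rw [hm0def]; exact PySem.Int.le_floordiv_iff_mul_le hrpos
      have hvG : G ft v = eaten + v * r := hreg v hlov (le_refl v)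
      by_cases hb : eaten + v * r > k
      · -- the budget stops inside this segment
        have hnPv : ¬ (G ft v ≤ k) := by omega
        have hvgt : max lo 0 < v := by
          by_contra hc
          exact hnPv (le_trans (G_mono ft (by omega)) hlo)
        have hloreg : G ft (max lo 0) = eaten + (max lo 0) * r :=
          hreg (max lo 0) (le_max_left _ _) (by omega)
        have hlom0 : max lo 0 ≤ m0 := (hbr1 _).mpr (by omega)
        have hm0v : m0 < v := by
          by_contra hc
          have := (hbr1 v).mp (by omega)
          omega
        have hmaxseg : ∀ m, m0 < m → m ≤ 2000000 → ¬ (G ft m ≤ k) := by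
          intro m hm hmC hGm
          by_cases hmv : m ≤ v
          · have := hreg m (by omega) hmv
            have : ¬ (m ≤ m0) := by omega
            rw [hbr1] at this
            omega
          · exact hnPv (le_trans (G_mono ft (by omega)) hGm)
        by_cases hm0C : m0 < 2000000
        · rw [if_pos hm0C]
          have hPm0 : G ft m0 ≤ k := by
            have := hreg m0 (by omega) (by omega)
            have := (hbr1 m0).mp (le_refl m0)
            omega
          exact ⟨by omega, by omega, hPm0, hmaxseg⟩
        · rw [if_neg hm0C]
          have hPC : G ft 2000000 ≤ k := by
            have := hreg 2000000 (by omega) (by omega)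
            have := (hbr1 2000000).mp (by omega)
            omega
          exact ⟨by omega, le_refl _, hPC, fun m hm hmC => by omega⟩
      · -- budget fine: stopped only because v exceeds the cap
        have hv : v > 2000000 := by rcases hstop with h | h; exact h; omega
        have hvm0 : v ≤ m0 := (hbr1 v).mpr (by omega)
        rw [if_neg (by omega)]
        have hPC : G ft 2000000 ≤ k := by
          have := hreg 2000000 (by omega) (by omega)
          have := (hbr1 2000000).mp (by omega)
          omega
        exact ⟨by omega, le_refl _, hPC, fun m hm hmC => by omega⟩
    · -- this level is fully cleared: continue with the rest
      rw [altWalk, if_neg hstop]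
      obtain ⟨hvC, hbud⟩ : v ≤ 2000000 ∧ eaten + v * r ≤ k := by
        constructor <;> by_contra hc <;> exact hstop (by omega)
      have hrec : altWalk k 2000000 rest (eaten + v) (r - 1)
          = altWalk k 2000000 rest (eaten + v) ((rest.length : Int)) := by
        have harg : r - 1 = ((rest.length : Int)) := by rw [hr]; ring
        rw [harg]
      rw [hrec]
      refine ih (eaten + v) v (List.Pairwise.of_cons hpw) hvrest hvC ?_ ?_
      · intro m hm
        have := hdec m (by omega)
        simp only [G, List.map, List.sum_cons] at this ⊢
        omega
      · by_cases hv0 : 0 ≤ v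
        · have := hreg v hlov (le_refl v)
          have hmx : max v 0 = v := by omega
          rw [hmx]; omega
        · have hmx : max v 0 = 0 := by omega
          have hmx2 : max lo 0 = 0 := by omega
          rw [hmx]; rw [hmx2] at hlo; exact hlo

-- small facts about the lower bound used to start the walk
lemma foldr_min_le_zero (xs : List Int) : xs.foldr min 0 ≤ 0 := by
  induction xs with
  | nil => simp
  | cons f rest ih => simp only [List.foldr_cons]; omega

lemma foldr_min_le_mem (xs : List Int) : ∀ f ∈ xs, xs.foldr min 0 ≤ f := by
  induction xs with
  | nil => simp
  | cons g rest ih =>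
    intro f hf
    rcases List.mem_cons.mp hf with h | h
    · simp only [List.foldr_cons]; omega
    · have := ih f h; simp only [List.foldr_cons]; omega

-- the two final loops agree: A's 'ans' is B's 'd - target'
lemma final_eq (a t : Int) : ∀ (xs : List Int) (i d : Int),
    solutionFinal (xs.map (fun f => f - a)) i (d - t) = altFinal a t xs i d := by
  intro xs
  induction xs with
  | nil => intro i d; simp [solutionFinal, altFinal]
  | cons f rest ih =>
    intro i d
    simp only [List.map, solutionFinal, altFinal]
    by_cases h : d = t
    · rw [if_pos (by omega), if_pos h]
    · rw [if_neg (by omega), if_neg h]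
      have harg : (if f - a < 0 then d - t + (f - a) else d - t)
          = (if f < a then d + (f - a) else d) - t := by split_ifs <;> omega
      rw [harg, ih]

-- ===== VERDICT (by name: the statement is the Claim_ definition above) =====
theorem solution_spec : Claim_equal_solution := by
  intro ft k _ hpre
  unfold Spec_solution solution solution_alt
  have hP0 : G ft 0 ≤ k := hpre
  -- A's binary search satisfies MSpec
  obtain ⟨aA, hsearch, hA⟩ := search_spec ft k hP0 2000001 0 2000000 none (by norm_num)
    (by omega) (by omega) (by omega) (fun m h1 h2 => by omega) (Or.inl ⟨rfl, rfl⟩)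
  -- B's walk satisfies MSpec
  have hperm : (PySem.List.sorted ft (fun x => x) false).Perm ft := PySem.List.sorted_perm ..
  have hlen : ((PySem.List.sorted ft (fun x => x) false).length : Int) = (ft.length : Int) := by
    rw [hperm.length_eq]
  have hB : MSpec ft k (altWalk k 2000000 (PySem.List.sorted ft (fun x => x) false) 0
      ((PySem.List.sorted ft (fun x => x) false).length : Int)) := by
    apply walk_spec ft k _ 0 (ft.foldr min 0)
    · simpa using PySem.List.sorted_pairwise (xs := ft) (key := fun x => x)
    · intro f hf
      exact foldr_min_le_mem ft f ((PySem.List.mem_sorted ..).mp hf)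
    · have := foldr_min_le_zero ft; omega
    · intro m _; rw [G_perm hperm.symm m]; omega
    · have hmx : max (ft.foldr min 0) 0 = 0 := by have := foldr_min_le_zero ft; omega
      rw [hmx]; exact hP0
  rw [hlen] at hB
  rw [hsearch]
  simp only [Option.getD_some]
  have haeq : aA = altWalk k 2000000 (PySem.List.sorted ft (fun x => x) false) ((0:Int)) ((ft.length : Int)) := by
    exact MSpec_unique hA (by simpa using hB)
  rw [← haeq]
  have := final_eq aA (aA * (ft.length : Int) - k) ft 0 0
  simpa using this
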